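-- pv_equiv track=rewrite | github.com/j3onghoon/algorithm | dynamic_programming/codility/2_number_solitaire.py | solution
-- ===== SOURCE A (Python) =====
-- def solution(A):
--     N = len(A)
--
--     if N <= 1:
--         return A[0]
--
--     dp = [0] * 6
--     dp[0] = A[0]
--
--     for i in range(1, min(N, 6)):
--         prev_max = max(dp[0:i])
--         dp[i] = prev_max + A[i]
--
--     for i in range(6, N):
--         prev_max = max(dp)
--         dp[i % 6] = prev_max + A[i]
--
--     return dp[(N - 1) % 6]
-- ===== SOURCE B (Python) =====
-- def solution(A):
--     if len(A) <= 1: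
--         return A[0]
--     # Monotonic deque of (index, best-score-ending-there) pairs with strictly
--     # decreasing scores; its front is always the window maximum, so no window
--     # is ever rescanned.
--     dq = [(0, A[0])]
--     cur = A[0]
--     for i in range(1, len(A)):
--         if dq[0][0] < i - 6:
--             dq.pop(0)
--         cur = A[i] + dq[0][1]
--         while dq and dq[-1][1] <= cur:
--             dq.pop()
--         dq.append((i, cur))
--     return cur
-- ===== Notes on version B (the rewrite author's own statement) =====
-- stated objective: alternative
-- what changed: Replaces A's size-6 circular buffer, whose two loops rescan the buffer with max() at every step, by a single pass maintaining a monotonic deque of (index, score) pairs with strictly decreasing scores, so the window maximum is read off the deque front in O(1) amortized and no window is ever rescanned.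
import Mathlib
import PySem

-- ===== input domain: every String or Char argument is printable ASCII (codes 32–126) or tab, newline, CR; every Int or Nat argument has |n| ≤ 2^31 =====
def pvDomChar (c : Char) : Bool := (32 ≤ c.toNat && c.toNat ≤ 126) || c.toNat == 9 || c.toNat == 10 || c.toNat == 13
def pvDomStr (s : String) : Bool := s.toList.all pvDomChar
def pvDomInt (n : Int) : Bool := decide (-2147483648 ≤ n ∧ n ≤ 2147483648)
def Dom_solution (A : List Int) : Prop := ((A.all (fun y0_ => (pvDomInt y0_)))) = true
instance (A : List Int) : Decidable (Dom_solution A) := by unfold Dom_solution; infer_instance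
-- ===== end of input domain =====

-- B replaces A's size-6 circular buffer, whose two loops rescan the buffer with
-- max() at every step, by a single pass over a monotonic deque of (index, score)
-- pairs whose front is always the window maximum (objective: alternative).

-- ===== PORT A =====
def solution (A : List Int) : Int :=
  let N : Int := A.length
  if N ≤ 1 then PySem.List.pyGetD A 0 0
  else
    let dp : List Int := List.replicate 6 0
    let dp := PySem.List.pySetD dp 0 (PySem.List.pyGetD A 0 0)
    let dp := (PySem.List.pyRange 1 (min N 6) 1).foldl (fun dp i =>
      let prevMax := (PySem.List.max? (PySem.List.slice dp (some 0) (some i)) (fun y => y)).getD 0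
      PySem.List.pySetD dp i (prevMax + PySem.List.pyGetD A i 0)) dp
    let dp := (PySem.List.pyRange 6 N 1).foldl (fun dp i =>
      let prevMax := (PySem.List.max? dp (fun y => y)).getD 0
      PySem.List.pySetD dp (PySem.Int.mod i 6) (prevMax + PySem.List.pyGetD A i 0)) dp
    PySem.List.pyGetD dp (PySem.Int.mod (N - 1) 6) 0

-- ===== PORT B =====
-- the `while dq and dq[-1][1] <= cur: dq.pop()` loop of Source B
def pvPopBack (cur : Int) (dq : List (Int × Int)) : List (Int × Int) :=
  if h : dq ≠ [] ∧ (PySem.List.pyGetD dq (-1) (0, 0)).2 ≤ cur then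
    pvPopBack cur dq.dropLast
  else dq
termination_by dq.length
decreasing_by
  simp only [List.length_dropLast]
  have := List.length_pos_of_ne_nil h.1
  omega

-- the body of Source B's for-loop; `dq[0]` is read with a default that is never
-- used because the deque is provably nonempty wherever Python reads it
def pvBody (A : List Int) (s : List (Int × Int) × Int) (i : Int) : List (Int × Int) × Int :=
  let dq := s.1
  let dq := if (PySem.List.pyGetD dq 0 ((0 : Int), (0 : Int))).1 < i - 6 then dq.tail else dq
  let cur := PySem.List.pyGetD A i 0 + (PySem.List.pyGetD dq 0 ((0 : Int), (0 : Int))).2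
  let dq := pvPopBack cur dq
  (dq ++ [(i, cur)], cur)

def solution_alt (A : List Int) : Int :=
  if (A.length : Int) ≤ 1 then PySem.List.pyGetD A 0 0
  else
    let s := (PySem.List.pyRange 1 (A.length : Int) 1).foldl (pvBody A)
      ([((0 : Int), PySem.List.pyGetD A 0 0)], PySem.List.pyGetD A 0 0)
    s.2

-- ===== PRECONDITION & SPEC =====
-- A raises IndexError on the empty list (it indexes the first element); that is the only exclusion.
def Pre_solution (A : List Int) : Prop := A ≠ []
instance (A : List Int) : Decidable (Pre_solution A) := by unfold Pre_solution; infer_instance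
def pvWitness_solution : List Int := ([1, 2, -3])

def Spec_solution (A : List Int) (out : Int) : Prop := out = solution_alt A
instance (A : List Int) (out : Int) : Decidable (Spec_solution A out) := by unfold Spec_solution; infer_instance

-- ===== CLAIM (what is proved, stated in full; the proofs are below) =====
def Claim_equal_solution : Prop := ∀ (A : List Int), Dom_solution A → Pre_solution A → Spec_solution A (solution A)

-- ===== LEMMAS AND PROOFS =====

def pvMx (l : List Int) : Int := (PySem.List.max? l (fun y => y)).getD 0

theorem pvMx_cons (x : Int) (t : List Int) : pvMx (x :: t) = t.foldl max x := by
  simp [pvMx, PySem.List.max?_id_cons]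

theorem foldl_max_out (v : List Int) (a x : Int) :
    v.foldl max (max a x) = max (v.foldl max a) x := by
  induction v generalizing a with
  | nil => rfl
  | cons y v ih =>
      simp only [List.foldl]
      rw [max_right_comm, ih]

theorem max_foldl_comm (u v : List Int) (a : Int) :
    v.foldl max (u.foldl max a) = u.foldl max (v.foldl max a) := by
  induction u generalizing a with
  | nil => rfl
  | cons x u ih =>
      simp only [List.foldl]
      rw [ih, foldl_max_out]

theorem pvMx_append_comm (u v : List Int) : pvMx (u ++ v) = pvMx (v ++ u) := by
  cases u with
  | nil => simp
  | cons x u =>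
    cases v with
    | nil => simp
    | cons y v =>
      rw [List.cons_append, pvMx_cons, List.cons_append, pvMx_cons]
      rw [List.foldl_append, List.foldl_append]
      simp only [List.foldl]
      rw [foldl_max_out v (u.foldl max x) y, max_foldl_comm u v x, ← foldl_max_out u,
          ← foldl_max_out v x y, max_comm x y, foldl_max_out v y x]

def pvF (dp : List Int) (a : Int) : List Int := dp ++ [a + pvMx (dp.drop (dp.length - 6))]

def pvD (h : Int) (t : List Int) (k : Nat) : List Int := (t.take k).foldl pvF [h]

theorem pvD_zero (h : Int) (t : List Int) : pvD h t 0 = [h] := rfl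

theorem length_foldl_pvF (l dp : List Int) : (l.foldl pvF dp).length = dp.length + l.length := by
  induction l generalizing dp with
  | nil => rfl
  | cons a l ih => simp [List.foldl, ih, pvF]; omega

theorem length_pvD (h : Int) (t : List Int) (k : Nat) (hk : k ≤ t.length) :
    (pvD h t k).length = k + 1 := by
  simp [pvD, length_foldl_pvF]; omega

theorem pvD_succ (h : Int) (t : List Int) (k : Nat) (hk : k < t.length) :
    pvD h t (k + 1) = pvD h t k ++ [t[k] + pvMx ((pvD h t k).drop (k + 1 - 6))] := by
  have h1 : pvD h t (k+1) = pvF (pvD h t k) t[k] := by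
    unfold pvD
    rw [List.take_add_one, List.getElem?_eq_getElem hk]
    simp only [Option.toList_some, List.foldl_append, List.foldl_cons, List.foldl_nil]
  rw [h1, pvF, length_pvD h t k hk.le]

theorem set_append_len (l r : List Int) (v : Int) : (l ++ r).set l.length v = l ++ r.set 0 v := by
  induction l with
  | nil => rfl
  | cons x l ih => simp [ih]

def pvRot (w : List Int) (m : Nat) : List Int := w.drop (6 - m) ++ w.take (6 - m)

theorem pvMx_rot (w : List Int) (m : Nat) : pvMx (pvRot w m) = pvMx w := by
  rw [pvRot, pvMx_append_comm, List.take_append_drop]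

theorem rot_set (w : List Int) (hw : w.length = 6) (m : Nat) (hm : m < 6) (e : Int) :
    (pvRot w m).set m e = pvRot (w.tail ++ [e]) ((m + 1) % 6) := by
  rcases w with _|⟨a, _|⟨b, _|⟨c, _|⟨d, _|⟨e2, _|⟨f, _|⟨g,w⟩⟩⟩⟩⟩⟩⟩ <;> simp_all
  interval_cases m <;> rfl

theorem rot_get (w : List Int) (hw : w.length = 6) (m : Nat) (hm : m < 6) :
    PySem.List.pyGetD (pvRot w m) (((m + 5) % 6 : Nat) : Int) 0 = w.getD 5 0 := by
  rcases w with _|⟨a, _|⟨b, _|⟨c, _|⟨d, _|⟨e2, _|⟨f, _|⟨g,w⟩⟩⟩⟩⟩⟩⟩ <;> simp_all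
  interval_cases m <;> rfl

def pvStep1 (A : List Int) (dp : List Int) (i : Int) : List Int :=
  let prevMax := (PySem.List.max? (PySem.List.slice dp (some 0) (some i)) (fun y => y)).getD 0
  PySem.List.pySetD dp i (prevMax + PySem.List.pyGetD A i 0)

def pvStep2 (A : List Int) (dp : List Int) (i : Int) : List Int :=
  let prevMax := (PySem.List.max? dp (fun y => y)).getD 0
  PySem.List.pySetD dp (PySem.Int.mod i 6) (prevMax + PySem.List.pyGetD A i 0)

theorem phase1 (hd : Int) (t : List Int) (j : Nat) (hj : j + 1 ≤ min (t.length + 1) 6) :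
    (PySem.List.pyRange 1 (1 + (j : Int)) 1).foldl (pvStep1 (hd :: t)) [hd, 0, 0, 0, 0, 0]
      = pvD hd t j ++ List.replicate (6 - (j + 1)) 0 := by
  induction j with
  | zero =>
      rw [PySem.List.pyRange_one_eq_nil (by omega)]
      simp [pvD_zero, List.replicate]
  | succ j ih =>
      have hjt : j < t.length := by omega
      have hj5 : j + 1 ≤ 5 := by omega
      have hcast : (1 + ((j : Nat) + 1 : Nat) : Int) = (1 + (j : Int)) + 1 := by push_cast; ring
      rw [hcast, PySem.List.pyRange_one_succ_right (by omega), List.foldl_append, List.foldl_cons,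
          List.foldl_nil, ih (by omega)]
      rw [pvStep1]
      have hlen : (pvD hd t j).length = j + 1 := length_pvD hd t j hjt.le
      have hslice : PySem.List.slice (pvD hd t j ++ List.replicate (6 - (j + 1)) 0) (some 0) (some (1 + (j : Int)))
          = pvD hd t j := by
        rw [PySem.List.slice_zero_start, PySem.List.slice_to _ (by omega)]
        rw [show ((1 + (j : Int)).toNat) = j + 1 by omega]
        exact List.take_left' hlen
      rw [hslice]
      have hget : PySem.List.pyGetD (hd :: t) (1 + (j : Int)) 0 = t[j] := by
        rw [show (1 + (j : Int)) = ((j + 1 : Nat) : Int) by push_cast; ring,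
            PySem.List.pyGetD_natCast]
        simp [List.getD_eq_getElem?_getD, List.getElem?_eq_getElem hjt]
      rw [hget]
      have hset : ∀ v : Int, PySem.List.pySetD (pvD hd t j ++ List.replicate (6 - (j + 1)) 0) (1 + (j : Int)) v
          = pvD hd t j ++ v :: List.replicate (6 - (j + 2)) 0 := by
        intro v
        rw [PySem.List.pySetD_of_nonneg _ _ (by omega), show ((1 + (j : Int)).toNat) = j + 1 by omega]
        rw [show (6 - (j + 1)) = (6 - (j + 2)) + 1 by omega, List.replicate_succ]
        rw [← hlen, set_append_len]
        rfl
      rw [hset]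
      rw [show ((PySem.List.max? (pvD hd t j) fun y => y).getD 0) = pvMx (pvD hd t j) from rfl]
      rw [pvD_succ hd t j hjt, show (j + 1 - 6) = 0 by omega, List.drop_zero]
      rw [add_comm (pvMx (pvD hd t j)) (t[j])]
      simp

theorem phase2 (hd : Int) (t : List Int) (j : Nat) (hj : 6 + j ≤ t.length + 1) :
    (PySem.List.pyRange 6 (6 + (j : Int)) 1).foldl (pvStep2 (hd :: t)) (pvD hd t 5)
      = pvRot ((pvD hd t (5 + j)).drop j) ((6 + j) % 6) := by
  induction j with
  | zero =>
      rw [show ((6 : Int) + ((0 : Nat) : Int)) = 6 by norm_num, PySem.List.pyRange_one_eq_nil (by omega)]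
      have hlen : (pvD hd t 5).length = 6 := length_pvD hd t 5 (by omega)
      rw [List.foldl_nil, pvRot]
      simp [List.drop_eq_nil_of_le (by omega : (pvD hd t 5).length ≤ 6),
            List.take_of_length_le (by omega : (pvD hd t 5).length ≤ 6)]
  | succ j ih =>
      have h5j : 5 + j < t.length := by omega
      have hcast : ((6 : Int) + ((j : Nat) + 1 : Nat)) = (6 + (j : Int)) + 1 := by push_cast; ring
      rw [hcast, PySem.List.pyRange_one_succ_right (by omega), List.foldl_append, List.foldl_cons,
          List.foldl_nil, ih (by omega)]
      rw [pvStep2]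
      set w := (pvD hd t (5 + j)).drop j with hw
      have hlenD : (pvD hd t (5 + j)).length = 5 + j + 1 := length_pvD hd t (5 + j) h5j.le
      have hlenw : w.length = 6 := by rw [hw, List.length_drop, hlenD]; omega
      have hm : (6 + j) % 6 < 6 := Nat.mod_lt _ (by omega)
      have hmod : PySem.Int.mod (6 + (j : Int)) 6 = (((6 + j) % 6 : Nat) : Int) := by
        rw [show ((6 : Int) + (j : Int)) = ((6 + j : Nat) : Int) by push_cast; ring]
        exact_mod_cast PySem.Int.mod_natCast (6 + j) 6
      have hget : PySem.List.pyGetD (hd :: t) (6 + (j : Int)) 0 = t[5 + j] := by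
        rw [show ((6 : Int) + (j : Int)) = ((5 + j + 1 : Nat) : Int) by push_cast; ring,
            PySem.List.pyGetD_natCast]
        simp [List.getD_eq_getElem?_getD, List.getElem?_eq_getElem h5j]
      rw [hmod, hget]
      have hsetD : ∀ v : Int, PySem.List.pySetD (pvRot w ((6 + j) % 6)) (((6 + j) % 6 : Nat) : Int) v
          = (pvRot w ((6 + j) % 6)).set ((6 + j) % 6) v := by
        intro v; rw [PySem.List.pySetD_natCast]
      rw [hsetD]
      rw [show ((PySem.List.max? (pvRot w ((6 + j) % 6)) fun y => y).getD 0) = pvMx (pvRot w ((6 + j) % 6)) from rfl]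
      rw [pvMx_rot w ((6 + j) % 6)]
      rw [rot_set w hlenw _ hm]
      have hDsucc : pvD hd t (5 + j + 1) = pvD hd t (5 + j) ++ [t[5 + j] + pvMx w] := by
        rw [pvD_succ hd t (5 + j) h5j, show (5 + j + 1 - 6) = j by omega, hw]
      have htail : w.tail ++ [pvMx w + t[5 + j]] = (pvD hd t (5 + (j + 1))).drop (j + 1) := by
        rw [show (5 + (j + 1)) = 5 + j + 1 by omega, hDsucc, add_comm (pvMx w) _]
        rw [List.drop_append_of_le_length (by omega), hw, List.tail_drop]
      rw [htail, show ((6 + j) % 6 + 1) % 6 = (6 + (j + 1)) % 6 by omega]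

theorem pyGetD_last (l : List Int) (n : Nat) (h : l.length = n + 1) :
    PySem.List.pyGetD l (-1) 0 = l.getD n 0 := by
  have hne : l ≠ [] := by intro he; rw [he] at h; simp at h
  rw [PySem.List.pyGetD_neg_one l 0 hne, List.getLast_eq_getElem hne,
      List.getD_eq_getElem l 0 (by omega)]
  congr 1; omega

theorem sol_eq (hd : Int) (t : List Int) (ht : t ≠ []) :
    solution (hd :: t) = PySem.List.pyGetD (pvD hd t t.length) (-1) 0 := by
  have hn : 1 ≤ t.length := List.length_pos_of_ne_nil ht
  set n := t.length with hnn
  unfold solution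
  rw [if_neg (by simp; omega)]
  simp only []
  rw [PySem.List.pyGetD_zero_cons, PySem.List.pySetD_of_nonneg _ _ (by omega)]
  rw [show ((List.replicate 6 (0:Int)).set (Int.toNat 0) hd) = [hd,0,0,0,0,0] from rfl]
  rw [show (fun (dp : List Int) (i : Int) =>
      let prevMax := (PySem.List.max? (PySem.List.slice dp (some 0) (some i)) (fun y => y)).getD 0
      PySem.List.pySetD dp i (prevMax + PySem.List.pyGetD (hd :: t) i 0)) = pvStep1 (hd :: t) from rfl]
  rw [show (fun (dp : List Int) (i : Int) =>
      let prevMax := (PySem.List.max? dp (fun y => y)).getD 0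
      PySem.List.pySetD dp (PySem.Int.mod i 6) (prevMax + PySem.List.pyGetD (hd :: t) i 0)) = pvStep2 (hd :: t) from rfl]
  have hlenc : ((hd :: t).length : Int) = (n : Int) + 1 := by simp [hnn]
  rw [hlenc]
  have hidx : PySem.Int.mod ((n : Int) + 1 - 1) 6 = ((n % 6 : Nat) : Int) := by
    rw [show ((n : Int) + 1 - 1) = ((n : Nat) : Int) by ring]
    exact_mod_cast PySem.Int.mod_natCast n 6
  rw [hidx]
  by_cases hc : n ≤ 5
  · -- short case: phase-2 loop is empty
    rw [show (min ((n : Int) + 1) 6) = 1 + (n : Int) by omega]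
    rw [phase1 hd t n (by omega)]
    rw [PySem.List.pyRange_one_eq_nil (by omega)]
    rw [List.foldl_nil]
    rw [show (n % 6) = n by omega]
    rw [PySem.List.pyGetD_natCast, List.getD_append _ _ _ _ (by rw [length_pvD hd t n (by omega)]; omega)]
    rw [pyGetD_last (pvD hd t n) n (length_pvD hd t n (by omega))]
  · -- long case
    have h6 : 6 ≤ n := by omega
    rw [show (min ((n : Int) + 1) 6) = 1 + ((5 : Nat) : Int) by push_cast; omega]
    rw [phase1 hd t 5 (by omega)]
    rw [show (6 - (5 + 1)) = 0 by omega, List.replicate_zero, List.append_nil]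
    rw [show ((n : Int) + 1) = 6 + ((n - 5 : Nat) : Int) by omega]
    rw [phase2 hd t (n - 5) (by omega)]
    rw [show (5 + (n - 5)) = n by omega]
    set w := (pvD hd t n).drop (n - 5) with hw
    have hlenD : (pvD hd t n).length = n + 1 := length_pvD hd t n (by omega)
    have hlenw : w.length = 6 := by rw [hw, List.length_drop, hlenD]; omega
    have hmlt : (6 + (n - 5)) % 6 < 6 := Nat.mod_lt _ (by omega)
    rw [show (n % 6) = ((6 + (n - 5)) % 6 + 5) % 6 by omega]
    rw [rot_get w hlenw _ hmlt]
    rw [pyGetD_last (pvD hd t n) n hlenD]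
    rw [List.getD_eq_getElem?_getD, hw, List.getElem?_drop, show ((n - 5) + 5) = n by omega,
        ← List.getD_eq_getElem?_getD]

-- ===== B-side machinery: dp values, the window, the monotonic deque invariant =====

def pvDv (hd : Int) (t : List Int) (j : Nat) : Int := (pvD hd t j).getD j 0

def pvEmb (hd : Int) (t : List Int) (j : Nat) : Int × Int := ((j : Int), pvDv hd t j)

def pvKeep (hd : Int) (t : List Int) (W : List Nat) (j : Nat) : Bool :=
  W.all (fun k => decide (j < k → pvDv hd t k < pvDv hd t j))

def pvSel (hd : Int) (t : List Int) (W : List Nat) : List Nat := W.filter (pvKeep hd t W)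

def pvCand (hd : Int) (t : List Int) (i : Nat) : List (Int × Int) :=
  (pvSel hd t (List.range' (i - 6) (min i 6 + 1))).map (pvEmb hd t)

theorem pvDv_zero (hd : Int) (t : List Int) : pvDv hd t 0 = hd := rfl

theorem getD_append_length (l : List Int) (x d : Int) : (l ++ [x]).getD l.length d = x := by
  simp [List.getD_eq_getElem?_getD, List.getElem?_append_right (le_refl l.length)]

theorem pvD_map (hd : Int) (t : List Int) (k : Nat) (hk : k ≤ t.length) :
    pvD hd t k = (List.range (k + 1)).map (pvDv hd t) := by
  induction k with
  | zero => simp [pvD_zero, List.range_succ, pvDv_zero]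
  | succ k ih =>
      have hk' : k < t.length := by omega
      have hs := pvD_succ hd t k hk'
      have hlen : (pvD hd t k).length = k + 1 := length_pvD hd t k hk'.le
      have hval : pvDv hd t (k + 1) = t[k] + pvMx ((pvD hd t k).drop (k + 1 - 6)) := by
        rw [pvDv, hs, ← hlen, getD_append_length]
      rw [hs, ← hval, List.range_succ, List.map_append, ← ih (by omega)]
      simp
theorem pvDv_succ (hd : Int) (t : List Int) (k : Nat) (hk : k < t.length) :
    pvDv hd t (k + 1)
      = t.getD k 0 + pvMx ((List.range' (k + 1 - 6) (min (k + 1) 6)).map (pvDv hd t)) := by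
  have hs := pvD_succ hd t k hk
  have hlen : (pvD hd t k).length = k + 1 := length_pvD hd t k hk.le
  have hval : pvDv hd t (k + 1) = t[k] + pvMx ((pvD hd t k).drop (k + 1 - 6)) := by
    rw [pvDv, hs, ← hlen, getD_append_length]
  rw [hval, pvD_map hd t k hk.le, ← List.map_drop, List.range_eq_range', List.drop_range',
      show (k + 1 - (k + 1 - 6)) = min (k + 1) 6 by omega,
      List.getD_eq_getElem?_getD, List.getElem?_eq_getElem hk]
  simp

theorem foldl_max_left_le (l : List Int) (a : Int) : a ≤ l.foldl max a := by
  induction l generalizing a with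
  | nil => exact le_refl a
  | cons x l ih => exact le_trans (le_max_left a x) (ih (max a x))

theorem le_foldl_max_of_mem (l : List Int) (a x : Int) (hx : x ∈ l) : x ≤ l.foldl max a := by
  induction l generalizing a with
  | nil => cases hx
  | cons y l ih =>
      rcases List.mem_cons.mp hx with h | h
      · subst h; exact le_trans (le_max_right a x) (foldl_max_left_le l (max a x))
      · exact ih (max a y) h

theorem foldl_max_eq_self (l : List Int) (a : Int) (h : ∀ x ∈ l, x ≤ a) : l.foldl max a = a := by
  induction l with
  | nil => rfl
  | cons x l ih =>
      simp only [List.foldl]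
      rw [max_eq_left (h x (List.mem_cons_self))]
      exact ih (fun y hy => h y (List.mem_cons_of_mem x hy))

-- head of the selected sublist carries the window maximum
theorem sel_head (hd : Int) (t : List Int) (W : List Nat) (hs : W.Pairwise (· < ·)) (hne : W ≠ []) :
    pvSel hd t W ≠ [] ∧ pvDv hd t ((pvSel hd t W).headD 0) = pvMx (W.map (pvDv hd t)) := by
  induction W with
  | nil => exact absurd rfl hne
  | cons j W' ih =>
      have hlt : ∀ k ∈ W', j < k := fun k hk => (List.pairwise_cons.mp hs).1 k hk
      have hkeep : pvKeep hd t (j :: W') j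
          = W'.all (fun k => decide (j < k → pvDv hd t k < pvDv hd t j)) := by
        simp [pvKeep]
      by_cases hj : pvKeep hd t (j :: W') j = true
      · have hdom : ∀ k ∈ W', pvDv hd t k < pvDv hd t j := by
          intro k hk
          have := (List.all_eq_true.mp (hkeep ▸ hj)) k hk
          exact (of_decide_eq_true this) (hlt k hk)
        have hself : pvSel hd t (j :: W') = j :: W'.filter (pvKeep hd t (j :: W')) := by
          rw [pvSel, List.filter_cons, if_pos hj]
        constructor
        · rw [hself]; exact List.cons_ne_nil _ _
        · rw [hself]
          simp only [List.headD_cons, List.map_cons]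
          rw [pvMx_cons]
          exact (foldl_max_eq_self _ _ (by
            intro x hx
            rcases List.mem_map.mp hx with ⟨k, hk, rfl⟩
            exact le_of_lt (hdom k hk))).symm
      · have hex : ∃ k ∈ W', pvDv hd t j ≤ pvDv hd t k := by
          by_contra hno
          push_neg at hno
          apply hj
          rw [hkeep]
          exact List.all_eq_true.mpr (fun k hk => decide_eq_true (fun _ => hno k hk))
        rcases hex with ⟨k0, hk0, hk0le⟩
        have hW'ne : W' ≠ [] := fun he => by subst he; cases hk0
        have hcongr : W'.filter (pvKeep hd t (j :: W')) = W'.filter (pvKeep hd t W') := by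
          apply List.filter_congr
          intro x hx
          have hjx : j < x := hlt x hx
          simp [pvKeep, show ¬ (x < j) by omega]
        have hjf : ¬ (pvKeep hd t (j :: W') j = true) := hj
        have hsel : pvSel hd t (j :: W') = pvSel hd t W' := by
          rw [pvSel, List.filter_cons, if_neg hjf, hcongr]; rfl
        have ihr := ih (List.pairwise_cons.mp hs).2 hW'ne
        refine ⟨by rw [hsel]; exact ihr.1, ?_⟩
        rw [hsel, ihr.2]
        rcases W' with _ | ⟨w, m⟩
        · exact absurd rfl hW'ne
        · have hle : pvDv hd t j ≤ (m.map (pvDv hd t)).foldl max (pvDv hd t w) := by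
            calc pvDv hd t j ≤ pvDv hd t k0 := hk0le
              _ ≤ (m.map (pvDv hd t)).foldl max (pvDv hd t w) := by
                  rcases List.mem_cons.mp hk0 with h | h
                  · subst h; exact foldl_max_left_le _ _
                  · exact le_foldl_max_of_mem _ _ _ (List.mem_map_of_mem h)
          have lhs : pvMx (List.map (pvDv hd t) (w :: m))
              = (m.map (pvDv hd t)).foldl max (pvDv hd t w) := by
            rw [List.map_cons, pvMx_cons]
          have rhs : pvMx (List.map (pvDv hd t) (j :: w :: m))
              = (m.map (pvDv hd t)).foldl max (max (pvDv hd t j) (pvDv hd t w)) := by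
            rw [List.map_cons, List.map_cons, pvMx_cons, List.foldl_cons]
          rw [lhs, rhs, max_comm (pvDv hd t j) (pvDv hd t w), foldl_max_out]
          exact (max_eq_left hle).symm

-- selected dp values are strictly decreasing along the deque
theorem sel_pairwise (hd : Int) (t : List Int) (W : List Nat) (hs : W.Pairwise (· < ·)) :
    (pvSel hd t W).Pairwise (fun j k => pvDv hd t k < pvDv hd t j) := by
  have h1 : (pvSel hd t W).Pairwise (· < ·) := hs.filter _
  refine h1.imp_of_mem ?_
  intro j k hj hk hjk
  have hkeepj : pvKeep hd t W j = true := List.of_mem_filter hj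
  have hkW : k ∈ W := List.mem_of_mem_filter hk
  exact (of_decide_eq_true ((List.all_eq_true.mp hkeepj) k hkW)) hjk

-- characterisation of the pop-while loop on a strictly decreasing deque
theorem popBack_split (cur : Int) (l2 l1 : List (Int × Int))
    (h1 : ∀ p ∈ l1, cur < p.2) (h2 : ∀ p ∈ l2, p.2 ≤ cur) :
    pvPopBack cur (l1 ++ l2) = l1 := by
  induction l2 using List.reverseRecOn generalizing l1 with
  | nil =>
      rw [List.append_nil, pvPopBack]
      rcases l1 with _ | _
      · simp
      · rw [dif_neg]
        intro hcc
        have hlast := List.getLast_mem hcc.1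
        have := h1 _ hlast
        rw [PySem.List.pyGetD_neg_one _ _ hcc.1] at hcc
        omega
  | append_singleton l2' p ih =>
      rw [← List.append_assoc, pvPopBack, dif_pos, List.dropLast_concat]
      · exact ih l1 h1 (fun q hq => h2 q (List.mem_append_left _ hq))
      · constructor
        · simp
        · rw [PySem.List.pyGetD_neg_one_append_singleton]
          exact h2 p (List.mem_append_right _ List.mem_cons_self)

theorem dropWhile_le (cur : Int) (l : List (Int × Int))
    (hp : l.Pairwise (fun a b => b.2 < a.2)) :
    ∀ q ∈ l.dropWhile (fun p => decide (cur < p.2)), q.2 ≤ cur := by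
  induction l with
  | nil => intro q hq; cases hq
  | cons a l ih =>
      intro q hq
      by_cases ha : cur < a.2
      · rw [List.dropWhile_cons_of_pos (by simpa using ha)] at hq
        exact ih (List.pairwise_cons.mp hp).2 q hq
      · rw [List.dropWhile_cons_of_neg (by simpa using ha)] at hq
        rcases List.mem_cons.mp hq with h | h
        · subst h; omega
        · have := (List.pairwise_cons.mp hp).1 q h
          omega

theorem takeWhile_eq_filter (cur : Int) (l : List (Int × Int))
    (hp : l.Pairwise (fun a b => b.2 < a.2)) :
    l.takeWhile (fun p => decide (cur < p.2)) = l.filter (fun p => decide (cur < p.2)) := by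
  induction l with
  | nil => rfl
  | cons a l ih =>
      by_cases ha : cur < a.2
      · rw [List.takeWhile_cons_of_pos (by simpa using ha),
            List.filter_cons_of_pos (by simpa using ha)]
        rw [ih (List.pairwise_cons.mp hp).2]
      · rw [List.takeWhile_cons_of_neg (by simpa using ha),
            List.filter_cons_of_neg (by simpa using ha)]
        symm
        rw [List.filter_eq_nil_iff]
        intro q hq
        have := (List.pairwise_cons.mp hp).1 q hq
        simp only [decide_eq_true_eq]
        omega

theorem popBack_filter (cur : Int) (l : List (Int × Int))
    (hp : l.Pairwise (fun a b => b.2 < a.2)) :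
    pvPopBack cur l = l.filter (fun p => decide (cur < p.2)) := by
  have hsplit := List.takeWhile_append_dropWhile (l := l) (p := fun p => decide (cur < p.2))
  rw [← takeWhile_eq_filter cur l hp]
  conv_lhs => rw [← hsplit]
  apply popBack_split
  · intro p hpmem
    have := List.mem_takeWhile_imp hpmem
    simpa using this
  · exact dropWhile_le cur l hp

theorem range'_pairwise (s n : Nat) : (List.range' s n).Pairwise (· < ·) :=
  List.pairwise_lt_range' 1 Nat.one_pos

-- splitting the selection at an appended maximal index
theorem sel_append (hd : Int) (t : List Int) (W : List Nat) (i : Nat)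
    (hlt : ∀ x ∈ W, x < i) :
    pvSel hd t (W ++ [i])
      = (pvSel hd t W).filter (fun x => decide (pvDv hd t i < pvDv hd t x)) ++ [i] := by
  rw [pvSel, List.filter_append]
  have h2 : [i].filter (pvKeep hd t (W ++ [i])) = [i] := by
    have : pvKeep hd t (W ++ [i]) i = true := by
      rw [pvKeep, List.all_append]
      have h1 : (W.all fun k => decide (i < k → pvDv hd t k < pvDv hd t i)) = true :=
        List.all_eq_true.mpr (fun k hk => decide_eq_true (fun hik => absurd (hlt k hk) (by omega)))
      rw [h1]
      simp
    simp [List.filter_cons, this]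
  rw [h2]
  congr 1
  rw [pvSel, List.filter_filter]
  apply List.filter_congr
  intro x hx
  rw [pvKeep, List.all_append, pvKeep]
  have hxi : x < i := hlt x hx
  have : [i].all (fun k => decide (x < k → pvDv hd t k < pvDv hd t x))
      = decide (pvDv hd t i < pvDv hd t x) := by
    simp [hxi]
  rw [this]
  exact Bool.and_comm _ _

-- the expiry step: popping the front of the deque yields the selection over the new window
theorem expiry (hd : Int) (t : List Int) (i : Nat) (hi1 : 1 ≤ i) :
    (if (PySem.List.pyGetD (pvCand hd t (i - 1)) 0 ((0 : Int), (0 : Int))).1 < (i : Int) - 6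
      then (pvCand hd t (i - 1)).tail else pvCand hd t (i - 1))
      = (pvSel hd t (List.range' (i - 6) (min i 6))).map (pvEmb hd t) := by
  by_cases hc : i ≤ 6
  · have hw : List.range' (i - 1 - 6) (min (i - 1) 6 + 1) = List.range' (i - 6) (min i 6) := by
      congr 1 <;> omega
    have hcand : pvCand hd t (i - 1) = (pvSel hd t (List.range' (i - 6) (min i 6))).map (pvEmb hd t) := by
      rw [pvCand, hw]
    rw [hcand]
    have hWne : List.range' (i - 6) (min i 6) ≠ [] := by
      simp only [ne_eq, List.range'_eq_nil_iff]; omega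
    obtain ⟨hne, -⟩ := sel_head hd t _ (range'_pairwise _ _) hWne
    rcases hs : pvSel hd t (List.range' (i - 6) (min i 6)) with _ | ⟨h0, rest⟩
    · exact absurd hs hne
    · rw [List.map_cons, if_neg]
      rw [PySem.List.pyGetD_zero_cons, pvEmb]
      have : (0 : Int) ≤ (h0 : Int) := Int.natCast_nonneg h0
      omega
  · have h7 : 7 ≤ i := by omega
    have hw : List.range' (i - 1 - 6) (min (i - 1) 6 + 1)
        = (i - 7) :: List.range' (i - 6) (min i 6) := by
      rw [show i - 1 - 6 = i - 7 by omega, show min (i - 1) 6 + 1 = 6 + 1 by omega,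
          List.range'_succ, show i - 7 + 1 = i - 6 by omega, show min i 6 = 6 by omega]
    have hcongr : ∀ x ∈ List.range' (i - 6) (min i 6),
        pvKeep hd t ((i - 7) :: List.range' (i - 6) (min i 6)) x
          = pvKeep hd t (List.range' (i - 6) (min i 6)) x := by
      intro x hx
      have hxlb : i - 6 ≤ x := (List.mem_range'_1.mp hx).1
      simp [pvKeep, show ¬ (x < i - 7) by omega]
    by_cases hk7 : pvKeep hd t ((i - 7) :: List.range' (i - 6) (min i 6)) (i - 7) = true
    · have hsel : pvSel hd t ((i - 7) :: List.range' (i - 6) (min i 6))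
          = (i - 7) :: pvSel hd t (List.range' (i - 6) (min i 6)) := by
        rw [pvSel, List.filter_cons, if_pos hk7, List.filter_congr hcongr]; rfl
      rw [pvCand, hw, hsel, List.map_cons, if_pos, List.tail_cons]
      rw [PySem.List.pyGetD_zero_cons, pvEmb]
      have : ((i - 7 : Nat) : Int) = (i : Int) - 7 := by omega
      omega
    · have hsel : pvSel hd t ((i - 7) :: List.range' (i - 6) (min i 6))
          = pvSel hd t (List.range' (i - 6) (min i 6)) := by
        rw [pvSel, List.filter_cons, if_neg hk7, List.filter_congr hcongr]; rfl
      rw [pvCand, hw, hsel]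
      have hWne : List.range' (i - 6) (min i 6) ≠ [] := by
        simp only [ne_eq, List.range'_eq_nil_iff]; omega
      obtain ⟨hne, -⟩ := sel_head hd t _ (range'_pairwise _ _) hWne
      rcases hs : pvSel hd t (List.range' (i - 6) (min i 6)) with _ | ⟨h0, rest⟩
      · exact absurd hs hne
      · have hh0 : h0 ∈ List.range' (i - 6) (min i 6) :=
          List.mem_of_mem_filter (hs ▸ List.mem_cons_self : h0 ∈ pvSel hd t _)
        have hlb : i - 6 ≤ h0 := (List.mem_range'_1.mp hh0).1
        rw [List.map_cons, if_neg]
        rw [PySem.List.pyGetD_zero_cons, pvEmb]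
        omega

-- one iteration of Source B's loop advances the deque invariant
theorem step_lemma (hd : Int) (t : List Int) (i : Nat) (hi1 : 1 ≤ i) (hit : i ≤ t.length) :
    pvBody (hd :: t) (pvCand hd t (i - 1), pvDv hd t (i - 1)) ((i : Nat) : Int)
      = (pvCand hd t i, pvDv hd t i) := by
  have hWp : (List.range' (i - 6) (min i 6)).Pairwise (· < ·) := range'_pairwise _ _
  have hWne : List.range' (i - 6) (min i 6) ≠ [] := by
    simp only [ne_eq, List.range'_eq_nil_iff]; omega
  obtain ⟨hselne, hselhead⟩ := sel_head hd t _ hWp hWne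
  rw [pvBody]
  simp only []
  rw [expiry hd t i hi1]
  have hhead : PySem.List.pyGetD ((pvSel hd t (List.range' (i - 6) (min i 6))).map (pvEmb hd t)) 0
      ((0 : Int), (0 : Int))
      = pvEmb hd t ((pvSel hd t (List.range' (i - 6) (min i 6))).headD 0) := by
    rcases hs : pvSel hd t (List.range' (i - 6) (min i 6)) with _ | ⟨h0, rest⟩
    · exact absurd hs hselne
    · rw [List.map_cons, PySem.List.pyGetD_zero_cons, List.headD_cons]
  rw [hhead]
  have hgetA : PySem.List.pyGetD (hd :: t) ((i : Nat) : Int) 0 = t.getD (i - 1) 0 := by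
    rw [PySem.List.pyGetD_natCast]
    rcases i with _ | i0
    · omega
    · simp
  rw [hgetA]
  have hcur : t.getD (i - 1) 0 + (pvEmb hd t ((pvSel hd t (List.range' (i - 6) (min i 6))).headD 0)).2
      = pvDv hd t i := by
    have hsucc := pvDv_succ hd t (i - 1) (by omega)
    rw [show i - 1 + 1 = i by omega] at hsucc
    rw [pvEmb, hselhead, hsucc]
  rw [hcur]
  have hpw : ((pvSel hd t (List.range' (i - 6) (min i 6))).map (pvEmb hd t)).Pairwise
      (fun a b => b.2 < a.2) :=
    (List.pairwise_map).mpr (sel_pairwise hd t _ hWp)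
  rw [popBack_filter _ _ hpw, List.filter_map]
  have hsplit : List.range' (i - 6) (min i 6 + 1) = List.range' (i - 6) (min i 6) ++ [i] := by
    rw [List.range'_1_concat, show i - 6 + min i 6 = i by omega]
  have hltW : ∀ x ∈ List.range' (i - 6) (min i 6), x < i := by
    intro x hx
    have := (List.mem_range'_1.mp hx).2
    omega
  rw [pvCand, hsplit, sel_append hd t _ i hltW, List.map_append]
  rw [List.map_cons, List.map_nil, pvEmb]
  rfl

-- the full loop of Source B maintains (deque, current score) = (pvCand, pvDv)
theorem invar (hd : Int) (t : List Int) (j : Nat) (hj : j ≤ t.length) :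
    (PySem.List.pyRange 1 (1 + (j : Int)) 1).foldl (pvBody (hd :: t)) ([((0 : Int), hd)], hd)
      = (pvCand hd t j, pvDv hd t j) := by
  induction j with
  | zero =>
      rw [PySem.List.pyRange_one_eq_nil (by omega), List.foldl_nil]
      have hc : pvCand hd t 0 = [((0 : Int), hd)] := by
        rw [pvCand, show (0 - 6 : Nat) = 0 by omega, show min 0 6 + 1 = 1 by omega]
        rw [show List.range' 0 1 = [0] from rfl]
        have hk : pvKeep hd t [0] 0 = true := by simp [pvKeep]
        rw [pvSel, List.filter_cons, if_pos hk, List.filter_nil, List.map_cons, List.map_nil,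
            pvEmb, pvDv_zero]
        simp
      rw [hc, pvDv_zero]
  | succ j ih =>
      rw [show (1 + ((j + 1 : Nat) : Int)) = (1 + (j : Int)) + 1 by push_cast; ring,
          PySem.List.pyRange_one_succ_right (by omega), List.foldl_append, List.foldl_cons,
          List.foldl_nil, ih (by omega)]
      have hstep := step_lemma hd t (j + 1) (by omega) hj
      rw [show (j + 1) - 1 = j by omega] at hstep
      rw [show (1 + (j : Int)) = ((j + 1 : Nat) : Int) by push_cast; ring]
      exact hstep

theorem alt_eq (hd : Int) (t : List Int) (ht : t ≠ []) :
    solution_alt (hd :: t) = pvDv hd t t.length := by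
  have hn : 1 ≤ t.length := List.length_pos_of_ne_nil ht
  unfold solution_alt
  rw [if_neg (by simp; omega)]
  simp only [PySem.List.pyGetD_zero_cons]
  rw [show (((hd :: t).length : Int)) = 1 + (t.length : Int) by simp; ring]
  rw [invar hd t t.length (le_refl _)]

theorem sol_eq_alt (A : List Int) (hA : A ≠ []) : solution A = solution_alt A := by
  cases A with
  | nil => exact absurd rfl hA
  | cons hd t =>
      by_cases ht : t = []
      · subst ht
        simp [solution, solution_alt]
      · rw [sol_eq hd t ht, alt_eq hd t ht,
            pyGetD_last _ _ (length_pvD hd t _ (le_refl _))]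
        rfl

-- ===== VERDICT (by name: the statement is the Claim_ definition above) =====
theorem solution_spec : Claim_equal_solution := by
  intro A _ hpre
  show solution A = solution_alt A
  exact sol_eq_alt A hpre
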